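-- pv_equiv track=rewrite | github.com/stackabletech/stack_scanner | stack_scanner/main.py | _filter_redundant_manifest_tags
-- ===== SOURCE A (Python) =====
-- _ARCH_SUFFIXES = ("-amd64", "-arm64")
--
-- def _filter_redundant_manifest_tags(tags: list[str]) -> list[str]:
--     """Remove non-arch-specific tags when arch-specific variants exist.
--
--     For example, if both "v4.5.1" and "v4.5.1-amd64" are present, the plain
--     "v4.5.1" tag is dropped because the arch-specific tags already cover it.
--     """
--     arch_bases = {
--         tag.removesuffix(suffix)
--         for tag in tags
--         for suffix in _ARCH_SUFFIXES
--         if tag.endswith(suffix)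
--     }
--     return [tag for tag in tags if tag not in arch_bases or tag.endswith(_ARCH_SUFFIXES)]
-- ===== SOURCE B (Python) =====
-- _ARCH_SUFFIXES = ("-amd64", "-arm64")
--
-- def _filter_redundant_manifest_tags(tags: list[str]) -> list[str]:
--     """Remove non-arch-specific tags when arch-specific variants exist."""
--     return [
--         tag
--         for tag in tags
--         if tag.endswith(_ARCH_SUFFIXES)
--         or not any(tag + suffix in tags for suffix in _ARCH_SUFFIXES)
--     ]
-- ===== Notes on version B (the rewrite author's own statement) =====
-- stated objective: simpler
-- what changed: B drops the precomputed arch_bases set entirely and instead, for each tag, rescans the original tags list for tag+suffix for each arch suffix, so the keep test is forward-looking (does an arch variant of this tag exist?) rather than backward-looking via removesuffix-built bases.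
import Mathlib
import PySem

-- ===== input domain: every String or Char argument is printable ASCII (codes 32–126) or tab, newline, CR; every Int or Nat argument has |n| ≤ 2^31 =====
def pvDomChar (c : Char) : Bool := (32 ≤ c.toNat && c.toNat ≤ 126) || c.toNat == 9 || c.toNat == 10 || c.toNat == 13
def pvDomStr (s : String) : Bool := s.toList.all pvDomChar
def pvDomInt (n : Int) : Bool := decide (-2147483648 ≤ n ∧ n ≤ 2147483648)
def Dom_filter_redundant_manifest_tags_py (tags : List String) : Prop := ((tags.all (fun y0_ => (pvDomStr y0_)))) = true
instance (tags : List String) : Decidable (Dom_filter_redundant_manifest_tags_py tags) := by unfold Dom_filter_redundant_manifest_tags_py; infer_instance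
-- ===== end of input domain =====

-- B replaces A's precomputed set of arch bases by an on-demand rescan of the tags list
-- (keep tag iff it is arch-specific or no tag+suffix variant occurs in tags); objective: simpler.

-- ===== PORT A =====
-- module constant _ARCH_SUFFIXES (shared by both Pythons)
def pvArchSuffixes : List String := ["-amd64", "-arm64"]

-- str.removesuffix, ported by hand (exact: drop the suffix's length from the end iff it is a suffix)
def pvRemovesuffix (s suffix : String) : String :=
  if PySem.Str.endswith s suffix then
    String.ofList (s.toList.take (s.toList.length - suffix.toList.length))
  else s

def filter_redundant_manifest_tags_py (tags : List String) : List String :=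
  let arch_bases : PySem.Set String :=
    tags.foldl (fun acc tag =>
      pvArchSuffixes.foldl (fun acc suffix =>
        if PySem.Str.endswith tag suffix then PySem.Set.add acc (pvRemovesuffix tag suffix)
        else acc) acc)
      PySem.Set.empty
  tags.filter (fun tag =>
    !(PySem.Set.contains arch_bases tag)
    || pvArchSuffixes.any (fun suffix => PySem.Str.endswith tag suffix))

-- ===== PORT B =====
def filter_redundant_manifest_tags_py_alt (tags : List String) : List String :=
  tags.filter (fun tag =>
    pvArchSuffixes.any (fun suffix => PySem.Str.endswith tag suffix)
    || !(pvArchSuffixes.any (fun suffix => tags.contains (tag ++ suffix))))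

-- ===== PRECONDITION & SPEC =====
def Spec_filter_redundant_manifest_tags_py (tags : List String) (out : List String) : Prop := out = filter_redundant_manifest_tags_py_alt tags
instance (tags : List String) (out : List String) : Decidable (Spec_filter_redundant_manifest_tags_py tags out) := by unfold Spec_filter_redundant_manifest_tags_py; infer_instance

-- ===== CLAIM (what is proved, stated in full; the proofs are below) =====
def Claim_equal_filter_redundant_manifest_tags_py : Prop := ∀ (tags : List String), Dom_filter_redundant_manifest_tags_py tags → Spec_filter_redundant_manifest_tags_py tags (filter_redundant_manifest_tags_py tags)

-- ===== LEMMAS AND PROOFS =====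

-- `removesuffix t suffix ++ suffix = t` whenever t ends with suffix
theorem pvRemovesuffix_append (t suffix : String) (h : PySem.Str.endswith t suffix = true) :
    pvRemovesuffix t suffix ++ suffix = t := by
  obtain ⟨p, hp⟩ : suffix.toList <:+ t.toList :=
    (PySem.Chars.endswith_iff t.toList suffix.toList).mp (by simpa using h)
  unfold pvRemovesuffix
  rw [if_pos h]
  apply String.toList_inj.mp
  simp only [String.toList_append, String.toList_ofList]
  rw [← hp, List.length_append,
    show p.length + suffix.toList.length - suffix.toList.length = p.length from by omega,
    List.take_left]

-- the tag ++ suffix string always ends with suffix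
theorem pvEndswith_append (x suffix : String) :
    PySem.Str.endswith (x ++ suffix) suffix = true := by
  simp only [PySem.Str.endswith_eq, String.toList_append]
  exact (PySem.Chars.endswith_iff _ _).mpr ⟨x.toList, rfl⟩

-- `removesuffix (x ++ suffix) suffix = x`
theorem pvRemovesuffix_of_append (x suffix : String) :
    pvRemovesuffix (x ++ suffix) suffix = x := by
  unfold pvRemovesuffix
  rw [if_pos (pvEndswith_append x suffix)]
  apply String.toList_inj.mp
  simp only [String.toList_ofList, String.toList_append]
  rw [List.length_append,
    show x.toList.length + suffix.toList.length - suffix.toList.length = x.toList.length from by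
      omega,
    List.take_left]

-- one comprehension step of A's set build
theorem pvMem_step (acc : PySem.Set String) (t suffix x : String) :
    x ∈ (if PySem.Str.endswith t suffix then PySem.Set.add acc (pvRemovesuffix t suffix) else acc)
    ↔ x ∈ acc ∨ (PySem.Str.endswith t suffix = true ∧ x = pvRemovesuffix t suffix) := by
  split_ifs with h
  · simp only [PySem.Set.mem_add, h, true_and]
  · simp only [h, Bool.false_eq_true, false_and, or_false]

-- the two concrete arch suffixes, as a disjunction
theorem pvExists_suffix (P : String → Prop) :
    (∃ s ∈ pvArchSuffixes, P s) ↔ P "-amd64" ∨ P "-arm64" := by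
  simp [pvArchSuffixes]

-- membership after one tag's inner comprehension loop
theorem pvMem_inner (acc : PySem.Set String) (t x : String) :
    x ∈ pvArchSuffixes.foldl (fun acc suffix =>
        if PySem.Str.endswith t suffix then PySem.Set.add acc (pvRemovesuffix t suffix)
        else acc) acc
    ↔ x ∈ acc ∨ ∃ suffix ∈ pvArchSuffixes,
        PySem.Str.endswith t suffix = true ∧ x = pvRemovesuffix t suffix := by
  rw [pvExists_suffix]
  simp only [pvArchSuffixes, List.foldl_cons, List.foldl_nil]
  rw [pvMem_step, pvMem_step, or_assoc]

-- membership in A's arch_bases fold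
theorem pvMem_bases (tags : List String) (acc : PySem.Set String) (x : String) :
    x ∈ tags.foldl (fun acc tag =>
      pvArchSuffixes.foldl (fun acc suffix =>
        if PySem.Str.endswith tag suffix then PySem.Set.add acc (pvRemovesuffix tag suffix)
        else acc) acc) acc
    ↔ x ∈ acc ∨ ∃ t ∈ tags, ∃ suffix ∈ pvArchSuffixes,
        PySem.Str.endswith t suffix = true ∧ x = pvRemovesuffix t suffix := by
  induction tags generalizing acc with
  | nil => simp
  | cons t ts ih =>
    rw [List.foldl_cons, ih, pvMem_inner]
    have hr : (∃ t' ∈ t :: ts, ∃ suffix ∈ pvArchSuffixes,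
        PySem.Str.endswith t' suffix = true ∧ x = pvRemovesuffix t' suffix)
        ↔ (∃ suffix ∈ pvArchSuffixes,
            PySem.Str.endswith t suffix = true ∧ x = pvRemovesuffix t suffix)
          ∨ ∃ t' ∈ ts, ∃ suffix ∈ pvArchSuffixes,
            PySem.Str.endswith t' suffix = true ∧ x = pvRemovesuffix t' suffix := by
      constructor
      · rintro ⟨t', ht', h⟩
        rcases List.mem_cons.mp ht' with h' | h'
        · exact Or.inl (h' ▸ h)
        · exact Or.inr ⟨t', h', h⟩
      · rintro (h | ⟨t', ht', h⟩)
        · exact ⟨t, List.mem_cons_self, h⟩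
        · exact ⟨t', List.mem_cons_of_mem _ ht', h⟩
    rw [hr]
    exact or_assoc

-- ===== VERDICT (by name: the statement is the Claim_ definition above) =====
theorem filter_redundant_manifest_tags_py_spec : Claim_equal_filter_redundant_manifest_tags_py := by
  intro tags _
  show filter_redundant_manifest_tags_py tags = filter_redundant_manifest_tags_py_alt tags
  unfold filter_redundant_manifest_tags_py filter_redundant_manifest_tags_py_alt
  apply List.filter_congr
  intro tag _
  have hkey : PySem.Set.contains (tags.foldl (fun acc tag =>
      pvArchSuffixes.foldl (fun acc suffix =>
        if PySem.Str.endswith tag suffix then PySem.Set.add acc (pvRemovesuffix tag suffix)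
        else acc) acc) PySem.Set.empty) tag
      = pvArchSuffixes.any (fun suffix => tags.contains (tag ++ suffix)) := by
    rw [Bool.eq_iff_iff]
    simp only [PySem.Set.contains_iff, List.any_eq_true, List.contains_iff_mem]
    rw [pvMem_bases]
    constructor
    · rintro (h | ⟨t, ht, s, hs, h1, rfl⟩)
      · simp [PySem.Set.empty] at h
      · exact ⟨s, hs, by rwa [pvRemovesuffix_append t s h1]⟩
    · rintro ⟨s, hs, h⟩
      exact Or.inr ⟨tag ++ s, h, s, hs, pvEndswith_append tag s,
        (pvRemovesuffix_of_append tag s).symm⟩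
  rw [hkey, Bool.or_comm]
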